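-- pv_equiv track=rewrite | github.com/binnev/advent-of-code | python/puzzles/y2023/day3.py | _find_all_number_coords
-- ===== SOURCE A (Python) =====
-- Coord = tuple[int, int]
--
-- def _find_all_number_coords(lines: list[str]) -> list[list[Coord]]:
--     results = []
--     for yy, line in enumerate(lines):
--         num = []
--         for xx, char in enumerate(line):
--             if char.isnumeric():
--                 num.append((xx, yy))  # start a new number
--             else:
--                 if num:
--                     results.append(num)  # finish number or not
--                 num = []
--         # when reach end of line, finish number
--         if num:
--             results.append(num)
--     return results
-- ===== SOURCE B (Python) =====
-- Coord = tuple[int, int]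
--
-- def _find_all_number_coords(lines: list[str]) -> list[list[Coord]]:
--     # Staged approach: per line, mark numeric positions, detect run starts and run
--     # ends by comparing each position with its shifted neighbour, pair them with
--     # zip, and expand each (start, end) pair into its coordinate range.
--     results = []
--     for yy, line in enumerate(lines):
--         dig = [c.isnumeric() for c in line]
--         starts = [x for x, (prev, cur) in enumerate(zip([False] + dig, dig)) if cur and not prev]
--         ends = [x for x, (cur, nxt) in enumerate(zip(dig, dig[1:] + [False])) if cur and not nxt]
--         for s, e in zip(starts, ends):
--             results.append([(x, yy) for x in range(s, e + 1)])
--     return results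
-- ===== Notes on version B (the rewrite author's own statement) =====
-- stated objective: alternative
-- what changed: Replaces A's single-pass accumulator state machine with staged passes per line: a boolean digit mask, run-start and run-end detection by zipping the mask with its shifted copies, pairing starts with ends via zip, and expanding each (start,end) pair into a coordinate range.
import Mathlib
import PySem

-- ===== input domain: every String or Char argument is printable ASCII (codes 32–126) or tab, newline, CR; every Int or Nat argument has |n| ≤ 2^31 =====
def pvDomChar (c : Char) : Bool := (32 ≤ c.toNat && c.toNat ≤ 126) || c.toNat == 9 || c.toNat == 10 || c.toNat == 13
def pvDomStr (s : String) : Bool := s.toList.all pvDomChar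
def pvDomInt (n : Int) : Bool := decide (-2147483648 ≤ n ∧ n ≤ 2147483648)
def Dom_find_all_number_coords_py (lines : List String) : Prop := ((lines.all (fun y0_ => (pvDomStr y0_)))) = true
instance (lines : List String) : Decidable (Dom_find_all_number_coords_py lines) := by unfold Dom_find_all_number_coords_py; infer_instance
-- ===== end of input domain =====

-- B replaces A's single-pass accumulator state machine by staged passes per line: a boolean
-- digit mask, run-start/run-end detection by zipping the mask with shifted copies, zip-pairing
-- the boundaries, and expanding each (start, end) pair into a coordinate range (alternative; same cost).
-- char.isnumeric() is ported as PySem.Chars.isdigit, which is exact on the printable-ASCII domain Dom.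

-- ===== PORT A =====
-- end-of-run / end-of-line flush: append num to results if nonempty
def pvFlush (st : List (List (Int × Int)) × List (Int × Int)) : List (List (Int × Int)) :=
  if st.2 ≠ [] then st.1 ++ [st.2] else st.1

-- inner loop body: state = (results, num)
def pvStepA (yy : Int) (st : List (List (Int × Int)) × List (Int × Int)) (xc : Int × Char) :
    List (List (Int × Int)) × List (Int × Int) :=
  if PySem.Chars.isdigit xc.2 then (st.1, st.2 ++ [(xc.1, yy)])
  else (if st.2 ≠ [] then st.1 ++ [st.2] else st.1, [])

def find_all_number_coords_py (lines : List String) : List (List (Int × Int)) :=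
  (PySem.List.enumerate lines 0).foldl
    (fun results yl =>
      pvFlush ((PySem.List.enumerate yl.2.toList 0).foldl (pvStepA yl.1) (results, [])))
    []

-- ===== PORT B =====
def find_all_number_coords_py_alt (lines : List String) : List (List (Int × Int)) :=
  (PySem.List.enumerate lines 0).foldl
    (fun results yl =>
      -- dig = [c.isnumeric() for c in line]
      let dig := yl.2.toList.map (fun c => PySem.Chars.isdigit c)
      -- starts = [x for x, (prev, cur) in enumerate(zip([False] + dig, dig)) if cur and not prev]
      let starts := ((PySem.List.enumerate (([false] ++ dig).zip dig) 0).filter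
          (fun p => p.2.2 && !p.2.1)).map (fun p => p.1)
      -- ends = [x for x, (cur, nxt) in enumerate(zip(dig, dig[1:] + [False])) if cur and not nxt]
      let ends := ((PySem.List.enumerate (dig.zip (PySem.List.slice dig (some 1) none ++ [false])) 0).filter
          (fun p => p.2.1 && !p.2.2)).map (fun p => p.1)
      -- for s, e in zip(starts, ends): results.append([(x, yy) for x in range(s, e + 1)])
      (starts.zip ends).foldl
        (fun acc se => acc ++ [(PySem.List.pyRange se.1 (se.2 + 1) 1).map (fun x => (x, yl.1))])
        results)
    []

-- ===== PRECONDITION & SPEC =====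
def Spec_find_all_number_coords_py (lines : List String) (out : List (List (Int × Int))) : Prop := out = find_all_number_coords_py_alt lines
instance (lines : List String) (out : List (List (Int × Int))) : Decidable (Spec_find_all_number_coords_py lines out) := by unfold Spec_find_all_number_coords_py; infer_instance

-- ===== CLAIM (what is proved, stated in full; the proofs are below) =====
def Claim_equal_find_all_number_coords_py : Prop := ∀ (lines : List String), Dom_find_all_number_coords_py lines → Spec_find_all_number_coords_py lines (find_all_number_coords_py lines)

-- ===== LEMMAS AND PROOFS =====

-- Canonical per-line result: the maximal digit runs, recursively (the bridge both ports are proved equal to).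
def pvLineGroups (yy : Int) : List (Int × Char) → List (List (Int × Int))
  | [] => []
  | p :: rest =>
    if PySem.Chars.isdigit p.2 then
      ((p :: rest.takeWhile (fun q => PySem.Chars.isdigit q.2)).map (fun q => (q.1, yy)))
        :: pvLineGroups yy (rest.dropWhile (fun q => PySem.Chars.isdigit q.2))
    else pvLineGroups yy rest
  termination_by l => l.length
  decreasing_by
  · simpa using Nat.lt_succ_of_le (rest.length_dropWhile_le _)
  · simp

-- recursive characterisations of B's boundary scans
def sAux : List Bool → Bool → Int → List Int
  | [], _, _ => []
  | b :: r, prev, k => if b && !prev then k :: sAux r b (k + 1) else sAux r b (k + 1)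

def eAux : List Bool → Int → List Int
  | [], _ => []
  | b :: r, k => if b && !(r.head?.getD false) then k :: eAux r (k + 1) else eAux r (k + 1)

def pvToRun (yy : Int) (se : Int × Int) : List (Int × Int) :=
  (PySem.List.pyRange se.1 (se.2 + 1) 1).map (fun x => (x, yy))

def pvLineB (yy : Int) (k : Int) (cs : List Char) : List (List (Int × Int)) :=
  ((sAux (cs.map (fun c => PySem.Chars.isdigit c)) false k).zip
    (eAux (cs.map (fun c => PySem.Chars.isdigit c)) k)).map (pvToRun yy)

-- A's inner fold plus the end-of-line flush produces exactly the digit runs of the line.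
theorem pv_inner (yy : Int) (l : List (Int × Char)) :
    ∀ (results : List (List (Int × Int))) (num : List (Int × Int)),
      pvFlush (l.foldl (pvStepA yy) (results, num)) =
      results ++
        (if num = [] then pvLineGroups yy l
         else (num ++ (l.takeWhile (fun q => PySem.Chars.isdigit q.2)).map (fun q => (q.1, yy)))
                :: pvLineGroups yy (l.dropWhile (fun q => PySem.Chars.isdigit q.2))) := by
  induction l with
  | nil =>
    intro results num
    by_cases h : num = [] <;> simp [pvFlush, h, pvLineGroups]
  | cons p rest ih =>
    intro results num
    rw [List.foldl_cons]
    by_cases hd : PySem.Chars.isdigit p.2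
    · rw [show pvStepA yy (results, num) p = (results, num ++ [(p.1, yy)]) from by
        simp [pvStepA, hd]]
      rw [ih results (num ++ [(p.1, yy)])]
      by_cases h : num = []
      · subst h; simp [pvLineGroups, hd]
      · simp [h, hd]
    · rw [show pvStepA yy (results, num) p =
            ((if num = [] then results else results ++ [num]), []) from by
        simp [pvStepA, hd]]
      rw [ih _ []]
      by_cases h : num = []
      · subst h; simp [pvLineGroups, hd]
      · simp [h, hd, pvLineGroups]

theorem pv_outer (L : List String) : ∀ (s : Int) (results : List (List (Int × Int))),
    (PySem.List.enumerate L s).foldl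
      (fun results yl =>
        pvFlush ((PySem.List.enumerate yl.2.toList 0).foldl (pvStepA yl.1) (results, []))) results =
    results ++ (PySem.List.enumerate L s).flatMap
      (fun yl => pvLineGroups yl.1 (PySem.List.enumerate yl.2.toList 0)) := by
  induction L with
  | nil => intro s results; simp [PySem.List.enumerate_nil]
  | cons line rest ih =>
    intro s results
    rw [PySem.List.enumerate_cons, List.foldl_cons, List.flatMap_cons]
    simp only
    rw [pv_inner s (PySem.List.enumerate line.toList 0) results []]
    rw [ih (s + 1)]
    simp

-- B's starts comprehension is sAux
theorem pv_s_eq (d : List Bool) : ∀ (prev : Bool) (k : Int),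
    ((PySem.List.enumerate ((prev :: d).zip d) k).filter
        (fun p => p.2.2 && !p.2.1)).map (fun p => p.1) = sAux d prev k := by
  induction d with
  | nil => intro prev k; simp [PySem.List.enumerate_nil, sAux]
  | cons b r ih =>
    intro prev k
    rw [show (prev :: b :: r).zip (b :: r) = (prev, b) :: ((b :: r).zip r) from rfl,
        PySem.List.enumerate_cons, List.filter_cons]
    cases hbv : (b && !prev) with
    | true => simp [hbv, sAux, ih]
    | false => simp [hbv, sAux, ih]

-- B's ends comprehension is eAux
theorem pv_e_eq (d : List Bool) : ∀ (k : Int),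
    ((PySem.List.enumerate (d.zip (d.tail ++ [false])) k).filter
        (fun p => p.2.1 && !p.2.2)).map (fun p => p.1) = eAux d k := by
  induction d with
  | nil => intro k; simp [PySem.List.enumerate_nil, eAux]
  | cons b r ih =>
    intro k
    have hz : (b :: r).zip (r ++ [false]) = (b, r.head?.getD false) :: (r.zip (r.tail ++ [false])) := by
      cases r <;> rfl
    rw [List.tail_cons, hz, PySem.List.enumerate_cons, List.filter_cons]
    cases hbv : (b && !(r.head?.getD false)) with
    | true => simp [hbv, eAux, ih]
    | false => simp [hbv, eAux, ih]

-- sAux ignores prev when the list starts with false (or is empty)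
theorem pv_sAux_prev (r : List Bool) (k : Int) (h : r.head?.getD false = false) :
    ∀ prev, sAux r prev k = sAux r false k := by
  cases r with
  | nil => intro prev; rfl
  | cons b r' =>
    intro prev
    simp at h
    simp [sAux, h]

theorem pv_sAux_run (m : Nat) : ∀ (r : List Bool) (k : Int), r.head?.getD false = false →
    sAux (List.replicate m true ++ r) true k = sAux r false (k + m) := by
  induction m with
  | zero => intro r k h; simpa using pv_sAux_prev r k h true
  | succ n ih =>
    intro r k h
    rw [List.replicate_succ, List.cons_append]
    show sAux (true :: (List.replicate n true ++ r)) true k = _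
    rw [show sAux (true :: (List.replicate n true ++ r)) true k
        = sAux (List.replicate n true ++ r) true (k + 1) from rfl]
    rw [ih r (k + 1) h]
    congr 1
    push_cast; ring

theorem pv_eAux_run (m : Nat) : ∀ (r : List Bool) (k : Int), r.head?.getD false = false →
    eAux (List.replicate (m + 1) true ++ r) k = (k + m) :: eAux r (k + m + 1) := by
  induction m with
  | zero =>
    intro r k h
    rw [show eAux (List.replicate (0 + 1) true ++ r) k = if (true && !(r.head?.getD false)) = true
          then k :: eAux r (k + 1) else eAux r (k + 1) from rfl]
    simp [h]
  | succ n ih =>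
    intro r k h
    rw [List.replicate_succ, List.cons_append]
    have hh : ((List.replicate (n + 1) true ++ r).head?.getD false) = true := by
      simp [List.replicate_succ]
    rw [show eAux (true :: (List.replicate (n + 1) true ++ r)) k
        = if (true && !((List.replicate (n + 1) true ++ r).head?.getD false)) = true
          then k :: eAux (List.replicate (n + 1) true ++ r) (k + 1)
          else eAux (List.replicate (n + 1) true ++ r) (k + 1) from rfl]
    rw [hh]
    simp only [Bool.not_true, Bool.and_false]
    rw [if_neg (by simp)]
    rw [ih r (k + 1) h]
    have e1 : k + 1 + (n : Int) = k + ((n : Nat) + 1 : Nat) := by push_cast; ring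
    rw [e1]

-- enumerate commutes with takeWhile / dropWhile on the value predicate
theorem pv_enum_takeWhile (p : Char → Bool) (l : List Char) : ∀ (k : Int),
    (PySem.List.enumerate l k).takeWhile (fun q => p q.2) =
      PySem.List.enumerate (l.takeWhile p) k := by
  induction l with
  | nil => intro k; simp [PySem.List.enumerate_nil]
  | cons c r ih =>
    intro k
    rw [PySem.List.enumerate_cons, List.takeWhile_cons, List.takeWhile_cons]
    by_cases h : p c
    · simp [h, PySem.List.enumerate_cons, ih]
    · simp [h, PySem.List.enumerate_nil]

theorem pv_enum_dropWhile (p : Char → Bool) (l : List Char) : ∀ (k : Int),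
    (PySem.List.enumerate l k).dropWhile (fun q => p q.2) =
      PySem.List.enumerate (l.dropWhile p) (k + (l.takeWhile p).length) := by
  induction l with
  | nil => intro k; simp [PySem.List.enumerate_nil]
  | cons c r ih =>
    intro k
    rw [PySem.List.enumerate_cons, List.dropWhile_cons, List.dropWhile_cons, List.takeWhile_cons]
    by_cases h : p c
    · simp only [h, if_true]
      rw [ih (k + 1)]
      congr 1
      simp
      push_cast; ring
    · simp [h, PySem.List.enumerate_cons]

-- indices of an enumerated run form a pyRange
theorem pv_enum_coords (yy : Int) (l : List Char) (k : Int) :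
    (PySem.List.enumerate l k).map (fun q => (q.1, yy)) =
      (PySem.List.pyRange k (k + l.length) 1).map (fun x => (x, yy)) := by
  have h1 : (PySem.List.enumerate l k).map (fun q => (q.1, yy))
      = ((PySem.List.enumerate l k).map (fun q => q.1)).map (fun x => (x, yy)) := by
    rw [List.map_map]; rfl
  rw [h1, PySem.List.map_fst_enumerate]

-- the mask of a digit run is all-true
theorem pv_mask_takeWhile (p : Char → Bool) (l : List Char) :
    (l.takeWhile p).map p = List.replicate (l.takeWhile p).length true := by
  induction l with
  | nil => simp
  | cons c r ih =>
    rw [List.takeWhile_cons]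
    by_cases h : p c
    · simp [h, ih, List.replicate_succ]
    · simp [h]

-- after dropWhile, the mask starts with false (or is empty)
theorem pv_mask_dropWhile (p : Char → Bool) (l : List Char) :
    (((l.dropWhile p).map p).head?.getD false) = false := by
  induction l with
  | nil => simp
  | cons c r ih =>
    rw [List.dropWhile_cons]
    by_cases h : p c
    · simp only [h, if_pos]
      simpa using ih
    · simp [h]

-- main per-line lemma: the run groups equal B's zip of boundary scans
theorem pv_line (yy : Int) : ∀ (n : Nat) (chars : List Char) (k : Int), chars.length ≤ n →
    pvLineGroups yy (PySem.List.enumerate chars k) = pvLineB yy k chars := by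
  intro n
  induction n with
  | zero =>
    intro chars k h
    have : chars = [] := by cases chars with | nil => rfl | cons a b => simp at h
    subst this
    simp [PySem.List.enumerate_nil, pvLineGroups, pvLineB, sAux, eAux]
  | succ n ih =>
    intro chars k h
    cases chars with
    | nil => simp [PySem.List.enumerate_nil, pvLineGroups, pvLineB, sAux, eAux]
    | cons c rest =>
      rw [PySem.List.enumerate_cons]
      by_cases hd : PySem.Chars.isdigit c
      · -- digit: a run starts here
        set P : Char → Bool := fun ch => PySem.Chars.isdigit ch with hP
        set t := rest.takeWhile P with ht
        set r' := rest.dropWhile P with hr'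
        set m := t.length with hm
        rw [show pvLineGroups yy ((k, c) :: PySem.List.enumerate rest (k + 1))
            = (((k, c) :: (PySem.List.enumerate rest (k + 1)).takeWhile (fun q => P q.2)).map
                (fun q => (q.1, yy)))
              :: pvLineGroups yy ((PySem.List.enumerate rest (k + 1)).dropWhile (fun q => P q.2)) from by
          rw [pvLineGroups]; simp [hd, hP]]
        rw [pv_enum_takeWhile, pv_enum_dropWhile]
        rw [show ((k, c) :: PySem.List.enumerate (rest.takeWhile P) (k + 1)).map (fun q => (q.1, yy))
            = (PySem.List.enumerate (c :: rest.takeWhile P) k).map (fun q => (q.1, yy)) from by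
          rw [PySem.List.enumerate_cons]]
        rw [pv_enum_coords]
        rw [ih r' (k + 1 + m) (by
          have h1 : r'.length ≤ rest.length := by
            rw [hr']; exact rest.length_dropWhile_le _
          simp at h
          omega)]
        -- now compute the RHS
        have hmask : rest.map P = List.replicate m true ++ r'.map P := by
          conv_lhs => rw [← List.takeWhile_append_dropWhile (p := P) (l := rest)]
          rw [List.map_append, ← ht, ← hr', pv_mask_takeWhile]
        have hhead : ((r'.map P).head?.getD false) = false := by
          rw [hr']; exact pv_mask_dropWhile P rest
        rw [pvLineB, pvLineB]
        rw [show (c :: rest).map (fun ch => PySem.Chars.isdigit ch) = true :: rest.map P from by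
          simp [hP, hd]]
        rw [hmask]
        rw [show sAux (true :: (List.replicate m true ++ r'.map P)) false k
            = k :: sAux (List.replicate m true ++ r'.map P) true (k + 1) from by simp [sAux]]
        rw [pv_sAux_run m _ _ hhead]
        rw [show eAux (true :: (List.replicate m true ++ r'.map P)) k
            = eAux (List.replicate (m + 1) true ++ r'.map P) k from by
          rw [List.replicate_succ, List.cons_append]]
        rw [pv_eAux_run m _ _ hhead]
        rw [List.zip_cons_cons, List.map_cons]
        congr 1
        · rw [show ((c :: t).length : Int) = (m : Int) + 1 from by simp [hm]]
          simp only [pvToRun]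
          rw [show k + ((m : Int) + 1) = k + (m : Int) + 1 from by ring]
        · rw [show k + 1 + (m : Int) = k + (m : Int) + 1 from by ring, hP]
      · -- non-digit: skip
        rw [show pvLineGroups yy ((k, c) :: PySem.List.enumerate rest (k + 1))
            = pvLineGroups yy (PySem.List.enumerate rest (k + 1)) from by
          rw [pvLineGroups]; simp [hd]]
        rw [ih rest (k + 1) (by simp at h; omega)]
        rw [pvLineB, pvLineB]
        rw [show (c :: rest).map (fun ch => PySem.Chars.isdigit ch)
            = false :: rest.map (fun ch => PySem.Chars.isdigit ch) from by simp [hd]]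
        rw [show sAux (false :: rest.map (fun ch => PySem.Chars.isdigit ch)) false k
            = sAux (rest.map (fun ch => PySem.Chars.isdigit ch)) false (k + 1) from by simp [sAux]]
        rw [show eAux (false :: rest.map (fun ch => PySem.Chars.isdigit ch)) k
            = eAux (rest.map (fun ch => PySem.Chars.isdigit ch)) (k + 1) from by simp [eAux]]

-- one line of B's loop appends exactly its boundary-zip runs
theorem pv_b_line (yl : Int × String) (results : List (List (Int × Int))) :
    (let dig := yl.2.toList.map (fun c => PySem.Chars.isdigit c)
     let starts := ((PySem.List.enumerate (([false] ++ dig).zip dig) 0).filter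
         (fun p => p.2.2 && !p.2.1)).map (fun p => p.1)
     let ends := ((PySem.List.enumerate (dig.zip (PySem.List.slice dig (some 1) none ++ [false])) 0).filter
         (fun p => p.2.1 && !p.2.2)).map (fun p => p.1)
     (starts.zip ends).foldl
       (fun acc se => acc ++ [(PySem.List.pyRange se.1 (se.2 + 1) 1).map (fun x => (x, yl.1))])
       results)
    = results ++ pvLineB yl.1 0 yl.2.toList := by
  simp only [PySem.List.slice_from_one]
  rw [PySem.List.foldl_append_singleton_eq_map]
  rw [show ([false] ++ yl.2.toList.map (fun c => PySem.Chars.isdigit c))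
      = false :: yl.2.toList.map (fun c => PySem.Chars.isdigit c) from rfl]
  rw [pv_s_eq, pv_e_eq]
  rfl

-- B's outer loop flattens the per-line runs in order
theorem pv_b_outer (L : List String) : ∀ (s : Int) (results : List (List (Int × Int))),
    (PySem.List.enumerate L s).foldl
      (fun results yl =>
        let dig := yl.2.toList.map (fun c => PySem.Chars.isdigit c)
        let starts := ((PySem.List.enumerate (([false] ++ dig).zip dig) 0).filter
            (fun p => p.2.2 && !p.2.1)).map (fun p => p.1)
        let ends := ((PySem.List.enumerate (dig.zip (PySem.List.slice dig (some 1) none ++ [false])) 0).filter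
            (fun p => p.2.1 && !p.2.2)).map (fun p => p.1)
        (starts.zip ends).foldl
          (fun acc se => acc ++ [(PySem.List.pyRange se.1 (se.2 + 1) 1).map (fun x => (x, yl.1))])
          results) results
    = results ++ (PySem.List.enumerate L s).flatMap (fun yl => pvLineB yl.1 0 yl.2.toList) := by
  induction L with
  | nil => intro s results; simp [PySem.List.enumerate_nil]
  | cons line rest ih =>
    intro s results
    rw [PySem.List.enumerate_cons, List.foldl_cons, List.flatMap_cons]
    simp only
    rw [pv_b_line (s, line) results, ih (s + 1)]
    simp

-- ===== VERDICT (by name: the statement is the Claim_ definition above) =====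
theorem find_all_number_coords_py_spec : Claim_equal_find_all_number_coords_py := by
  intro lines _
  unfold Spec_find_all_number_coords_py find_all_number_coords_py find_all_number_coords_py_alt
  rw [pv_outer lines 0 [], pv_b_outer lines 0 []]
  simp only [List.nil_append]
  congr 1
  funext yl
  exact pv_line yl.1 yl.2.toList.length yl.2.toList 0 le_rfl
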